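-- pv_equiv track=rewrite | github.com/alybryn/Advent-of-Code | 2023/code/12.py | count_maximum_damaged_comprehensive
-- ===== SOURCE A (Python) =====
-- def count_maximum_damaged_comprehensive(spring):
--     ret = []
--     count = 0
--     counting_damaged = False
--     for c in spring:
--         if c == '.':
--             if counting_damaged:
--                 ret.append(count)
--                 count = 0
--                 counting_damaged = False
--             count += 1
--         elif c in ['#', '?']:
--             if not counting_damaged:
--                 counting_damaged = True
--                 if count != 0:
--                     ret.append(0 - count)
--                     count = 0
--             count +=1
--     if count != 0:
--         if not counting_damaged:
--             count = 0 - count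
--         ret.append(count)
--     return ret
-- ===== SOURCE B (Python) =====
-- def count_maximum_damaged_comprehensive(spring):
--     # Map each relevant character to a signed unit (-1 for '.', +1 for '#'/'?'),
--     # then merge adjacent units of the same sign into the output list.
--     signs = [(-1 if c == '.' else 1) for c in spring if c in '.#?']
--     ret = []
--     for s in signs:
--         if ret and (ret[-1] > 0) == (s > 0):
--             ret[-1] += s
--         else:
--             ret.append(s)
--     return ret
-- ===== Notes on version B (the rewrite author's own statement) =====
-- stated objective: simpler
-- what changed: Replaces A's three-variable state machine (count, counting_damaged flag, post-loop flush) with a filter-map to signed units followed by a merge of same-sign neighbours directly into the output list.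
import Mathlib
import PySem

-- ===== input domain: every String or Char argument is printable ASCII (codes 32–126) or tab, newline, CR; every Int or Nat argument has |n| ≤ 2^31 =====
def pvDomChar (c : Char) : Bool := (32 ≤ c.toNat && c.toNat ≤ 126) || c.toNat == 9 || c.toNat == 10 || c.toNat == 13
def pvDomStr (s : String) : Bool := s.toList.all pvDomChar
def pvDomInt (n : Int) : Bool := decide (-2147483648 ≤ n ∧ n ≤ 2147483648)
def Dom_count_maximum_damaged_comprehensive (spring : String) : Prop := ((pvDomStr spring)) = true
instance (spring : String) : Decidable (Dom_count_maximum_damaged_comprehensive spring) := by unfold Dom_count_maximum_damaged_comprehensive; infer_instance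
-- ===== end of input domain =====

-- B replaces A's count/flag state machine by a filter-map to signed units followed by
-- merging same-sign neighbours into the output list (simpler decomposition, same cost).

-- ===== PORT A =====
-- one loop iteration of A, state (ret, count, counting_damaged)
def pvAStep (st : List Int × Int × Bool) (c : Char) : List Int × Int × Bool :=
  let (ret, count, counting) := st
  if c = '.' then
    if counting then (ret ++ [count], 0 + 1, false)
    else (ret, count + 1, counting)
  else if c = '#' ∨ c = '?' then
    if ¬ counting then
      if count ≠ 0 then (ret ++ [0 - count], 0 + 1, true)
      else (ret, count + 1, true)
    else (ret, count + 1, counting)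
  else st

def count_maximum_damaged_comprehensive (spring : String) : List Int :=
  let (ret, count, counting) := spring.toList.foldl pvAStep ([], 0, false)
  if count ≠ 0 then ret ++ [if ¬ counting then 0 - count else count] else ret

-- ===== PORT B =====
-- merge one signed unit into the output list: ret[-1] += s if same sign, else append
def pvBStep (ret : List Int) (s : Int) : List Int :=
  match ret.getLast? with
  | none => ret ++ [s]
  | some l => if (decide (l > 0)) = (decide (s > 0)) then ret.dropLast ++ [l + s] else ret ++ [s]

def count_maximum_damaged_comprehensive_alt (spring : String) : List Int :=
  ((spring.toList.filter (fun c => c = '.' ∨ c = '#' ∨ c = '?')).map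
    (fun c => if c = '.' then (-1 : Int) else 1)).foldl pvBStep []

-- ===== PRECONDITION & SPEC =====
def Spec_count_maximum_damaged_comprehensive (spring : String) (out : List Int) : Prop := out = count_maximum_damaged_comprehensive_alt spring
instance (spring : String) (out : List Int) : Decidable (Spec_count_maximum_damaged_comprehensive spring out) := by unfold Spec_count_maximum_damaged_comprehensive; infer_instance

-- ===== CLAIM (what is proved, stated in full; the proofs are below) =====
def Claim_equal_count_maximum_damaged_comprehensive : Prop := ∀ (spring : String), Dom_count_maximum_damaged_comprehensive spring → Spec_count_maximum_damaged_comprehensive spring (count_maximum_damaged_comprehensive spring)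

-- ===== LEMMAS AND PROOFS =====

-- A's post-loop flush of the pending run
def pvAFin (st : List Int × Int × Bool) : List Int :=
  if st.2.1 ≠ 0 then st.1 ++ [if ¬ st.2.2 then 0 - st.2.1 else st.2.1] else st.1

-- loop invariant: B's accumulated output equals A's flushed state; A's pending count is
-- nonnegative, positive while a run is open, and ret is empty while count = 0
def pvInv (ret : List Int) (count : Int) (counting : Bool) (bs : List Int) : Prop :=
  bs = pvAFin (ret, count, counting) ∧ (count = 0 → ret = [] ∧ counting = false) ∧
    (counting = true → 0 < count) ∧ 0 ≤ count

lemma pvInv_step (c : Char) (ret : List Int) (count : Int) (counting : Bool) (bs : List Int)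
    (h : pvInv ret count counting bs) :
    pvInv (pvAStep (ret, count, counting) c).1 (pvAStep (ret, count, counting) c).2.1
      (pvAStep (ret, count, counting) c).2.2
      (if c = '.' ∨ c = '#' ∨ c = '?' then pvBStep bs (if c = '.' then (-1 : Int) else 1) else bs) := by
  obtain ⟨hbs, h0, hc, hnn⟩ := h
  subst hbs
  by_cases hdot : c = '.'
  · subst hdot
    rw [if_pos (Or.inl rfl), if_pos rfl]
    cases counting with
    | true =>
      have hcpos := hc rfl
      rw [show pvAStep (ret, count, true) '.' = (ret ++ [count], 0 + 1, false) from by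
        simp [pvAStep]]
      unfold pvInv; dsimp only
      refine ⟨?_, by intro h; omega, by simp, by omega⟩
      simp [pvAFin, pvBStep, hcpos.ne', List.getLast?_append, hcpos]
    | false =>
      rw [show pvAStep (ret, count, false) '.' = (ret, count + 1, false) from by
        simp [pvAStep]]
      unfold pvInv; dsimp only
      by_cases hz : count = 0
      · obtain ⟨hr, _⟩ := h0 hz
        subst hz hr
        exact ⟨by simp [pvAFin, pvBStep], by intro h; omega, by simp, by omega⟩
      · refine ⟨?_, by intro h; omega, by simp, by omega⟩
        simp [pvAFin, pvBStep, hz, List.getLast?_append, hnn, show count + 1 ≠ 0 by omega]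
        ring
  · by_cases hdm : c = '#' ∨ c = '?'
    · rw [if_pos (Or.inr hdm), if_neg hdot]
      cases counting with
      | true =>
        have hcpos := hc rfl
        rw [show pvAStep (ret, count, true) c = (ret, count + 1, true) from by
          simp [pvAStep, hdot, hdm]]
        unfold pvInv; dsimp only
        refine ⟨?_, by intro h; omega, fun _ => by omega, by omega⟩
        simp [pvAFin, pvBStep, hcpos.ne', List.getLast?_append, hcpos, show count + 1 ≠ 0 by omega]
      | false =>
        by_cases hz : count = 0
        · obtain ⟨hr, _⟩ := h0 hz
          subst hz hr
          rw [show pvAStep ([], 0, false) c = ([], 0 + 1, true) from by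
            simp [pvAStep, hdot, hdm]]
          unfold pvInv; dsimp only
          exact ⟨by simp [pvAFin, pvBStep], by intro h; omega, fun _ => by omega, by omega⟩
        · rw [show pvAStep (ret, count, false) c = (ret ++ [0 - count], 0 + 1, true) from by
            simp [pvAStep, hdot, hdm, hz]]
          unfold pvInv; dsimp only
          refine ⟨?_, by intro h; omega, fun _ => by omega, by omega⟩
          simp [pvAFin, pvBStep, hz, List.getLast?_append, hnn]
    · have hm : ¬ (c = '.' ∨ c = '#' ∨ c = '?') := by
        rintro (h | h) <;> [exact hdot h; exact hdm h]
      rw [if_neg hm, show pvAStep (ret, count, counting) c = (ret, count, counting) from by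
        simp [pvAStep, hdot, hdm]]
      exact ⟨rfl, h0, hc, hnn⟩

lemma pvInv_foldl (cs : List Char) (ret : List Int) (count : Int) (counting : Bool) (bs : List Int)
    (h : pvInv ret count counting bs) :
    pvAFin (cs.foldl pvAStep (ret, count, counting)) =
      ((cs.filter (fun c => c = '.' ∨ c = '#' ∨ c = '?')).map
        (fun c => if c = '.' then (-1 : Int) else 1)).foldl pvBStep bs := by
  induction cs generalizing ret count counting bs with
  | nil => exact h.1.symm
  | cons c cs ih =>
    have hstep := pvInv_step c ret count counting bs h
    rcases hst : pvAStep (ret, count, counting) c with ⟨r, cnt, ctg⟩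
    rw [hst] at hstep
    simp only [List.foldl_cons, hst, List.filter_cons, decide_eq_true_eq]
    by_cases hm : c = '.' ∨ c = '#' ∨ c = '?'
    · rw [if_pos hm, List.map_cons, List.foldl_cons]
      rw [if_pos hm] at hstep
      exact ih r cnt ctg _ hstep
    · rw [if_neg hm]
      rw [if_neg hm] at hstep
      exact ih r cnt ctg bs hstep

-- ===== VERDICT (by name: the statement is the Claim_ definition above) =====
theorem count_maximum_damaged_comprehensive_spec : Claim_equal_count_maximum_damaged_comprehensive := by
  intro spring _
  unfold Spec_count_maximum_damaged_comprehensive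
  unfold count_maximum_damaged_comprehensive count_maximum_damaged_comprehensive_alt
  have h := pvInv_foldl spring.toList [] 0 false []
    ⟨by simp [pvAFin], fun _ => ⟨rfl, rfl⟩, by simp, le_refl 0⟩
  rcases hst : spring.toList.foldl pvAStep ([], 0, false) with ⟨r, cnt, ctg⟩
  rw [hst] at h
  simpa [pvAFin] using h
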